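-- pv_equiv track=rewrite | github.com/ravidosa/euler | utils/digits.py | decimal_partition
-- ===== SOURCE A (Python) =====
-- def decimal_partition(n):
--     if n == None:
--         yield []
--     else:
--         s = str(n)
--         for i in range(1, len(s) + 1):
--             prev, next = int(s[:i]), int(s[i:]) if i != len(s) else None
--             for p in decimal_partition(next):
--                 yield [prev] + p
-- ===== SOURCE B (Python) =====
-- def decimal_partition(n):
--     stack = [(n, [])]
--     while stack:
--         cur, prefix = stack.pop()
--         if cur is None:
--             yield prefix
--         else:
--             s = str(cur)
--             for i in range(len(s), 0, -1):
--                 prev = int(s[:i])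
--                 nxt = int(s[i:]) if i != len(s) else None
--                 stack.append((nxt, prefix + [prev]))
-- ===== Notes on version B (the rewrite author's own statement) =====
-- stated objective: alternative
-- what changed: Replaced the recursive generator with an iterative explicit-stack DFS worklist that pushes (next_value, prefix) frames in reverse split order, yielding the same partitions in the same order without recursion.
import Mathlib
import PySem

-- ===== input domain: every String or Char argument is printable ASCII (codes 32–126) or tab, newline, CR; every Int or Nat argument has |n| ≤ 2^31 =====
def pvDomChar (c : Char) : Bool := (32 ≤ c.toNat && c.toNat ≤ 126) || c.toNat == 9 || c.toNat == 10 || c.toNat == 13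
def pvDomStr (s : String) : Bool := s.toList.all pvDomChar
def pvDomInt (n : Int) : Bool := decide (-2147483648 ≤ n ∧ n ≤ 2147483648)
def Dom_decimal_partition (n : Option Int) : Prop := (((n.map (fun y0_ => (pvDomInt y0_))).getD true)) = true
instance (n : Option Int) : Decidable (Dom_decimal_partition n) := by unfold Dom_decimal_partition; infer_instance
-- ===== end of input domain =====

-- B replaces A's recursive generator by an iterative explicit-stack DFS worklist (same values, same order; no speed claim).

-- ===== PORT A =====
-- Literal port of A's recursive generator (the generator's full yield sequence as a list).
-- The Nat argument is a fuel guard making the recursion total; with the fuel used below it never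
-- runs out on the admitted inputs (depth ≤ digits+1 ≤ 11 inside Dom).
def pvDpA : Nat → Option Int → List (List Int)
  | 0, _ => []
  | _ + 1, none => [[]]
  | f + 1, some m =>
    let s := PySem.Int.toChars m
    (PySem.List.pyRange 1 ((s.length : Int) + 1) 1).foldl (fun acc i =>
      let prev := (PySem.Int.ofChars? (PySem.List.slice s none (some i))).getD 0
      let next : Option Int :=
        if i ≠ (s.length : Int) then
          some ((PySem.Int.ofChars? (PySem.List.slice s (some i) none)).getD 0)
        else none
      acc ++ (pvDpA f next).map (fun p => prev :: p)) []

def decimal_partition (n : Option Int) : List (List Int) := pvDpA 64 n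

-- ===== PORT B =====
-- pop-count of the DFS subtree rooted at a frame with the given fuel: the termination measure of the
-- stack loop (each pop decreases the total by exactly one).
def pvPops : Nat → Option Int → Nat
  | 0, _ => 1
  | _ + 1, none => 1
  | f + 1, some m =>
    let s := PySem.Int.toChars m
    1 + ((PySem.List.pyRange 1 ((s.length : Int) + 1) 1).map (fun i =>
      pvPops f (if i ≠ (s.length : Int) then
          some ((PySem.Int.ofChars? (PySem.List.slice s (some i) none)).getD 0)
        else none))).sum

-- foldl-push = reverse-map-prepend: used by the stack loop's termination proof and the main lemma.
theorem pvFoldlCons {α β : Type} (g : α → β) (l : List α) (rest : List β) :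
    l.foldl (fun st i => g i :: st) rest = (l.map g).reverse ++ rest := by
  induction l generalizing rest with
  | nil => simp
  | cons x xs ih => simp [List.foldl_cons, ih]

-- Literal port of B's while-loop: the stack's head is Python's stack top (list.pop end); frames carry
-- the same fuel guard as A's port (never reached on the admitted inputs).
def pvDpB : List (Nat × Option Int × List Int) → List (List Int) → List (List Int)
  | [], acc => acc
  | (0, _, _) :: rest, acc => pvDpB rest acc
  | (_ + 1, none, pre) :: rest, acc => pvDpB rest (acc ++ [pre])
  | (f + 1, some m, pre) :: rest, acc =>
    let s := PySem.Int.toChars m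
    let stack' := (PySem.List.pyRange (s.length : Int) 0 (-1)).foldl (fun st i =>
      let prev := (PySem.Int.ofChars? (PySem.List.slice s none (some i))).getD 0
      let next : Option Int :=
        if i ≠ (s.length : Int) then
          some ((PySem.Int.ofChars? (PySem.List.slice s (some i) none)).getD 0)
        else none
      (f, next, pre ++ [prev]) :: st) rest
    pvDpB stack' acc
  termination_by stack _ => (stack.map (fun fr => pvPops fr.1 fr.2.1)).sum
  decreasing_by
  · simp [pvPops]
  · simp [pvPops]
  · rw [pvFoldlCons]
    simp only [List.map_append, List.sum_append, List.map_reverse, List.sum_reverse, List.map_map,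
      List.map_cons, List.sum_cons, PySem.List.pyRange_neg_one_eq_reverse]
    simp only [Function.comp_def]
    simp [pvPops]

def decimal_partition_alt (n : Option Int) : List (List Int) := pvDpB [(64, n, [])] []

-- ===== PRECONDITION & SPEC =====
-- A raises ValueError on some negative n (int("-") on the sign character), so Pre_ admits exactly
-- None and the nonnegative integers, on all of which A returns.
def Pre_decimal_partition (n : Option Int) : Prop := 0 ≤ n.getD 0
instance (n : Option Int) : Decidable (Pre_decimal_partition n) := by unfold Pre_decimal_partition; infer_instance
def pvWitness_decimal_partition : Option Int := (some 12)
def Spec_decimal_partition (n : Option Int) (out : List (List Int)) : Prop := out = decimal_partition_alt n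
instance (n : Option Int) (out : List (List Int)) : Decidable (Spec_decimal_partition n out) := by unfold Spec_decimal_partition; infer_instance

-- ===== CLAIM (what is proved, stated in full; the proofs are below) =====
def Claim_equal_decimal_partition : Prop := ∀ (n : Option Int), Dom_decimal_partition n → Pre_decimal_partition n → Spec_decimal_partition n (decimal_partition n)

-- ===== LEMMAS AND PROOFS =====

theorem pvDpB_eq (stack : List (Nat × Option Int × List Int)) (acc : List (List Int)) :
    pvDpB stack acc = acc ++ stack.flatMap (fun fr => (pvDpA fr.1 fr.2.1).map (fun p => fr.2.2 ++ p)) := by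
  fun_induction pvDpB stack acc with
  | case1 acc => simp
  | case2 c p rest acc ih => simp [ih, pvDpA]
  | case3 f pre rest acc ih => simp [ih, pvDpA]
  | case4 f m pre rest acc s stack' ih =>
    rw [ih]
    congr 1
    simp only [stack', s]
    rw [pvFoldlCons, PySem.List.pyRange_neg_one_eq_reverse]
    simp only [List.map_reverse, List.reverse_reverse, List.flatMap_append, List.flatMap_cons,
      List.flatMap_map]
    congr 1
    conv_rhs => rw [pvDpA]
    simp [List.map_map, Function.comp_def, List.flatMap_def]

-- ===== VERDICT (by name: the statement is the Claim_ definition above) =====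
theorem decimal_partition_spec : Claim_equal_decimal_partition := by
  intro n _ _
  show decimal_partition n = decimal_partition_alt n
  rw [decimal_partition, decimal_partition_alt, pvDpB_eq]
  simp
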